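-- pv_equiv track=rewrite | github.com/xiaohongred/leetcode-python | stack-problem/leetcode-1856.py | maxSumMinProduct
-- ===== SOURCE A (Python) =====
-- from typing import List
--
-- def maxSumMinProduct(nums: List[int]) -> int:
--     res = 0
--     stack = []  # [(start, val), (start, val)]
--     prefix = [0]
--
--     for n in nums:
--         prefix.append(prefix[-1] + n)  # prefis[i] 代表 nums [0, i) 之间所有元素的和
--
--     for i, n in enumerate(nums):
--         newStart = i
--         while stack and stack[-1][1] > n:  # nums = [2, 1] , stack = [(0,2)], 当前正在处理元素1， 也就是 i=1, n = 1时，处理这种情况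
--             start, val = stack.pop()  # start = 0, val = 2
--             total = prefix[i] - prefix[start]  # prefix[1] - prefix[0] = nums[0]
--             res = max(res, val * total)
--             newStart = start  # newStart = 0 因为 n < 之前的栈顶元素，所以可以认为n为最小值的连续子数组，可以包含之前的栈顶元素
--         stack.append((newStart, n))  # stack = [(0, 1)]
--     # stack = [(start, val), (start, val)] 中存的每个元素，
--     #   代表nums中索引从 start 开始，值为val的元素，到nums 数组最后一个元素，val 都是最小值，
--     #   因为如果stack 中的 val 不是最小值，在上面的 while stack and stack[-1][1] > n: 条件中就已经出栈了
--     for start, val in stack:  # stack 中的元素是单调递增的，比如 1 2 2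
--         total = prefix[len(nums)] - prefix[start]
--         # prefix[0] = 0,
--         # prefix[1] = 0 + nums[0],
--         # prefix[2] = nums[0] + nums[1]
--         res = max(res, total * val)
--     return res % (10 ** 9 + 7)
-- ===== SOURCE B (Python) =====
-- from typing import List
--
-- def maxSumMinProduct(nums: List[int]) -> int:
--     n = len(nums)
--     prefix = [0]
--     for x in nums:
--         prefix.append(prefix[-1] + x)
--     # left[i] = start of the maximal window in which nums[i] is a minimum:
--     # one past the nearest j < i with nums[j] <= nums[i] (0 if none),
--     # computed by jumping through already-known left boundaries.
--     left = []
--     for i in range(n):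
--         s = i
--         while s > 0 and nums[s - 1] > nums[i]:
--             s = left[s - 1]
--         left.append(s)
--     # right[i] = end (exclusive) of that window: the nearest j > i with
--     # nums[j] < nums[i] (n if none), computed by jumping from the right.
--     right = [n] * n
--     for i in range(n - 1, -1, -1):
--         r = i + 1
--         while r < n and nums[r] >= nums[i]:
--             r = right[r]
--         right[i] = r
--     res = 0
--     for i in range(n):
--         res = max(res, nums[i] * (prefix[right[i]] - prefix[left[i]]))
--     return res % (10 ** 9 + 7)
-- ===== Notes on version B (the rewrite author's own statement) =====
-- stated objective: alternative
-- what changed: Replaces the single-pass monotonic value-stack (which evaluates a window each time an element is popped, plus a final flush loop) by two boundary-jumping passes that compute, for every index, the left and right ends of the maximal window in which that element is a minimum, followed by one independent max pass over the per-index window products.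
import Mathlib
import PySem

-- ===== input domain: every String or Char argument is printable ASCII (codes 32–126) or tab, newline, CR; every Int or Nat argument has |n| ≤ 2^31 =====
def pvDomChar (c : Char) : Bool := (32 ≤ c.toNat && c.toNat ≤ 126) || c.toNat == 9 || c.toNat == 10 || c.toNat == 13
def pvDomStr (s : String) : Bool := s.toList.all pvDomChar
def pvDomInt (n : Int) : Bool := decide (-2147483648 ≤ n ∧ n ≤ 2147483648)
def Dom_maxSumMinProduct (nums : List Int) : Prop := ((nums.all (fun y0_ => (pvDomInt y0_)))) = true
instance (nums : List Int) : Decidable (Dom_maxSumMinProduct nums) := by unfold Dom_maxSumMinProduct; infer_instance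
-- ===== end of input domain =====

-- B replaces A's single-pass monotonic value-stack by two boundary-jumping passes
-- (per-index maximal-window ends) plus one independent max pass; alternative
-- decomposition of the same O(n) task, equal return value on every input.

-- shared prologue of both Pythons: `prefix = [0]; for x in nums: prefix.append(prefix[-1] + x)`
def pvPrefix (nums : List Int) : List Int :=
  nums.foldl (fun pf x => pf ++ [pf.getLast?.getD 0 + x]) [0]

-- ===== PORT A =====
-- the `while stack and stack[-1][1] > n:` pop loop; the stack's head is Python's stack[-1];
-- returns (res, stack, newStart)
def pvAPop (pf : List Int) (i : Nat) (n : Int) :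
    List (Nat × Int) → Int → Nat → Int × List (Nat × Int) × Nat
  | [], res, newStart => (res, [], newStart)
  | (start, val) :: rest, res, newStart =>
    if n < val then
      pvAPop pf i n rest (max res (val * (pf.getD i 0 - pf.getD start 0))) start
    else (res, (start, val) :: rest, newStart)

-- the `for i, n in enumerate(nums):` loop carrying (res, stack)
def pvAMain (pf : List Int) : List Int → Nat → Int → List (Nat × Int) → Int × List (Nat × Int)
  | [], _, res, stack => (res, stack)
  | n :: rest, i, res, stack =>
    match pvAPop pf i n stack res i with
    | (res', stack', newStart) => pvAMain pf rest (i + 1) res' ((newStart, n) :: stack')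

def maxSumMinProduct (nums : List Int) : Int :=
  let pf := pvPrefix nums
  match pvAMain pf nums 0 0 [] with
  | (res, stack) =>
    -- `for start, val in stack:` iterates bottom-to-top, i.e. over stack.reverse here
    PySem.Int.mod
      (stack.reverse.foldl
        (fun r sv => max r (sv.2 * (pf.getD nums.length 0 - pf.getD sv.1 0))) res)
      (10 ^ 9 + 7)

-- ===== PORT B =====
-- `s = i; while s > 0 and nums[s-1] > nums[i]: s = left[s-1]` — each jump strictly
-- decreases s, so fuel = initial s makes the recursion exact
def pvBJumpL (nums : List Int) (left : List Nat) (v : Int) : Nat → Nat → Nat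
  | 0, s => s
  | fuel + 1, s =>
    if 0 < s then
      if v < nums.getD (s - 1) 0 then pvBJumpL nums left v fuel (left.getD (s - 1) 0)
      else s
    else s

-- `r = i+1; while r < n and nums[r] >= nums[i]: r = right[r]` — each jump strictly
-- increases r towards n, so fuel = n - (i+1) makes the recursion exact
def pvBJumpR (nums : List Int) (right : List Nat) (v : Int) : Nat → Nat → Nat
  | 0, r => r
  | fuel + 1, r =>
    if r < nums.length then
      if v ≤ nums.getD r 0 then pvBJumpR nums right v fuel (right.getD r 0)
      else r
    else r

def maxSumMinProduct_alt (nums : List Int) : Int :=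
  let n := nums.length
  let pf := pvPrefix nums
  let left := (List.range n).foldl
    (fun left i => left ++ [pvBJumpL nums left (nums.getD i 0) i i]) []
  let right := (List.range n).reverse.foldl
    (fun right i => right.set i (pvBJumpR nums right (nums.getD i 0) (n - (i + 1)) (i + 1)))
    (List.replicate n n)
  PySem.Int.mod
    ((List.range n).foldl
      (fun res i =>
        max res (nums.getD i 0 * (pf.getD (right.getD i 0) 0 - pf.getD (left.getD i 0) 0)))
      0)
    (10 ^ 9 + 7)

-- ===== PRECONDITION & SPEC =====
def Spec_maxSumMinProduct (nums : List Int) (out : Int) : Prop := out = maxSumMinProduct_alt nums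
instance (nums : List Int) (out : Int) : Decidable (Spec_maxSumMinProduct nums out) := by unfold Spec_maxSumMinProduct; infer_instance

-- ===== CLAIM (what is proved, stated in full; the proofs are below) =====
def Claim_equal_maxSumMinProduct : Prop := ∀ (nums : List Int), Dom_maxSumMinProduct nums → Spec_maxSumMinProduct nums (maxSumMinProduct nums)

-- ===== LEMMAS AND PROOFS =====

-- value of nums at a Nat index (both ports use getD-with-default-0 at in-range indices only)
def pvG (l : List Int) (k : Nat) : Int := l.getD k 0
-- sum of the first k elements = Python's prefix[k]
def pvPfx (l : List Int) (k : Nat) : Int := (l.take k).sum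

-- e "survives" stage i: no strictly smaller element strictly between e and i
def pvSurvB (l : List Int) (i e : Nat) : Bool :=
  (List.range i).all (fun j => decide (e < j → pvG l e ≤ pvG l j))

def pvSurvList (l : List Int) (i : Nat) : List Nat :=
  (List.range i).filter (fun e => pvSurvB l i e)
def pvDropList (l : List Int) (i : Nat) : List Nat :=
  (List.range i).filter (fun e => !pvSurvB l i e)

-- left/right boundary of the maximal window in which l[e] is a minimum
def pvLeftSpec (l : List Int) (e s : Nat) : Prop :=
  s ≤ e ∧ (∀ j, s ≤ j → j < e → pvG l e < pvG l j) ∧ (s = 0 ∨ pvG l (s - 1) ≤ pvG l e)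
def pvRightSpec (l : List Int) (e r : Nat) : Prop :=
  e < r ∧ r ≤ l.length ∧ (∀ j, e < j → j < r → pvG l e ≤ pvG l j) ∧
    (r = l.length ∨ pvG l r < pvG l e)

-- canonical boundaries, by plain scan (proof-side only)
def pvSAux (l : List Int) (v : Int) : Nat → Nat
  | 0 => 0
  | s + 1 => if v < pvG l s then pvSAux l v s else s + 1
def pvSE (l : List Int) (e : Nat) : Nat := pvSAux l (pvG l e) e

def pvRAux (l : List Int) (v : Int) : Nat → Nat → Nat
  | 0, r => r
  | f + 1, r => if v ≤ pvG l r then pvRAux l v f (r + 1) else r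
def pvRE (l : List Int) (e : Nat) : Nat := pvRAux l (pvG l e) (l.length - (e + 1)) (e + 1)

def pvProd (l : List Int) (e : Nat) : Int :=
  pvG l e * (pvPfx l (pvRE l e) - pvPfx l (pvSE l e))
def pvM (xs : List Int) : Int := xs.foldl max 0
def pvKey (l : List Int) : Int := pvM ((List.range l.length).map (pvProd l))

theorem pvSurvB_iff (l : List Int) (i e : Nat) :
    pvSurvB l i e = true ↔ ∀ j, j < i → e < j → pvG l e ≤ pvG l j := by
  simp only [pvSurvB, List.all_eq_true, List.mem_range, decide_eq_true_eq]

theorem pvPrefix_eq (l : List Int) :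
    pvPrefix l = (List.range (l.length + 1)).map (pvPfx l) := by
  have key : ∀ (l : List Int) (acc : List Int) (c : Int), acc ≠ [] → acc.getLast? = some c →
      l.foldl (fun pf x => pf ++ [pf.getLast?.getD 0 + x]) acc =
        acc ++ (List.range l.length).map (fun k => c + pvPfx l (k + 1)) := by
    intro l
    induction l with
    | nil => intro acc c _ _; simp
    | cons x l ih =>
      intro acc c hne hlast
      have hgd : acc.getLast?.getD 0 = c := by rw [hlast]; rfl
      simp only [List.foldl_cons, hgd]
      rw [ih (acc ++ [c + x]) (c + x) (by simp) (by simp [List.getLast?_append])]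
      simp only [List.append_assoc, List.length_cons]
      congr 1
      rw [List.range_succ_eq_map]
      simp only [List.map_cons, List.map_map, List.singleton_append]
      congr 1
      · simp [pvPfx]
      · apply List.map_congr_left
        intro k _
        simp only [Function.comp_apply, pvPfx, List.take_succ_cons, List.sum_cons]
        ring
  rw [pvPrefix, key l [0] 0 (by simp) (by simp)]
  rw [List.range_succ_eq_map]
  simp only [List.map_cons, List.map_map, List.singleton_append]
  refine congrArg₂ List.cons (by simp [pvPfx]) ?_
  apply List.map_congr_left
  intro k _
  simp [Function.comp, pvPfx]

theorem pvPrefix_getD (l : List Int) (k : Nat) (hk : k ≤ l.length) :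
    (pvPrefix l).getD k 0 = pvPfx l k := by
  rw [pvPrefix_eq]
  have hk' : k < l.length + 1 := by omega
  simp [List.getD, hk']

theorem pvLeftSpec_lt (l : List Int) (e s1 s2 : Nat)
    (h1 : pvLeftSpec l e s1) (h2 : pvLeftSpec l e s2) (h : s1 < s2) : False := by
  obtain ⟨hle1, hmid1, _⟩ := h1
  obtain ⟨hle2, _, hlast2⟩ := h2
  have h2pos : s2 ≠ 0 := by omega
  rcases hlast2 with h0 | hval
  · exact h2pos h0
  · have := hmid1 (s2 - 1) (by omega) (by omega)
    omega

theorem pvLeftSpec_unique (l : List Int) (e s1 s2 : Nat)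
    (h1 : pvLeftSpec l e s1) (h2 : pvLeftSpec l e s2) : s1 = s2 := by
  rcases Nat.lt_trichotomy s1 s2 with h | h | h
  · exact absurd (pvLeftSpec_lt l e s1 s2 h1 h2 h) (by simp)
  · exact h
  · exact absurd (pvLeftSpec_lt l e s2 s1 h2 h1 h) (by simp)

theorem pvRightSpec_lt (l : List Int) (e r1 r2 : Nat)
    (h1 : pvRightSpec l e r1) (h2 : pvRightSpec l e r2) (h : r1 < r2) : False := by
  obtain ⟨hgt1, hle1, _, hlast1⟩ := h1
  obtain ⟨hgt2, hle2, hmid2, _⟩ := h2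
  rcases hlast1 with h0 | hval
  · omega
  · have := hmid2 r1 (by omega) (by omega)
    omega

theorem pvRightSpec_unique (l : List Int) (e r1 r2 : Nat)
    (h1 : pvRightSpec l e r1) (h2 : pvRightSpec l e r2) : r1 = r2 := by
  rcases Nat.lt_trichotomy r1 r2 with h | h | h
  · exact absurd (pvRightSpec_lt l e r1 r2 h1 h2 h) (by simp)
  · exact h
  · exact absurd (pvRightSpec_lt l e r2 r1 h2 h1 h) (by simp)

theorem pvSAux_spec (l : List Int) (e : Nat) :
    ∀ s, s ≤ e → (∀ j, s ≤ j → j < e → pvG l e < pvG l j) →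
      pvLeftSpec l e (pvSAux l (pvG l e) s)
  | 0, hse, hmid => by
    simp only [pvSAux]
    exact ⟨Nat.zero_le e, hmid, Or.inl rfl⟩
  | s + 1, hse, hmid => by
    simp only [pvSAux]
    split
    · exact pvSAux_spec l e s (by omega)
        (fun j hj hje => by
          rcases Nat.eq_or_lt_of_le hj with h | h
          · simpa [← h] using ‹pvG l e < pvG l s›
          · exact hmid j (by omega) hje)
    · exact ⟨hse, hmid, Or.inr (by simpa using not_lt.mp ‹¬ pvG l e < pvG l s›)⟩

theorem pvSE_spec (l : List Int) (e : Nat) : pvLeftSpec l e (pvSE l e) :=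
  pvSAux_spec l e e le_rfl (fun j hj hje => by omega)

theorem pvRAux_spec (l : List Int) (e : Nat) :
    ∀ f r, r + f = l.length → e < r →
      (∀ j, e < j → j < r → pvG l e ≤ pvG l j) →
      pvRightSpec l e (pvRAux l (pvG l e) f r)
  | 0, r, hf, her, hmid => by
    simp only [pvRAux]
    exact ⟨her, by omega, hmid, Or.inl (by omega)⟩
  | f + 1, r, hf, her, hmid => by
    simp only [pvRAux]
    split
    · exact pvRAux_spec l e f (r + 1) (by omega) (by omega)
        (fun j hje hj => by
          rcases Nat.lt_or_ge j r with h | h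
          · exact hmid j hje h
          · have : j = r := by omega
            simpa [this] using ‹pvG l e ≤ pvG l r›)
    · exact ⟨her, by omega, hmid, Or.inr (by simpa using not_le.mp ‹¬ pvG l e ≤ pvG l r›)⟩

theorem pvRE_spec (l : List Int) (e : Nat) (he : e < l.length) :
    pvRightSpec l e (pvRE l e) :=
  pvRAux_spec l e (l.length - (e + 1)) (e + 1) (by omega) (by omega) (fun j hje hj => by omega)

theorem pvExistsSurv (l : List Int) :
    ∀ d i k, i - k ≤ d → k < i → ¬ (pvSurvB l i k = true) →
      ∃ e, k < e ∧ e < i ∧ pvSurvB l i e = true ∧ pvG l e < pvG l k := by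
  intro d
  induction d with
  | zero => intro i k hd hk _; omega
  | succ d ih =>
    intro i k hd hk hns
    rw [pvSurvB_iff] at hns
    push_neg at hns
    obtain ⟨j, hji, hkj, hgj⟩ := hns
    by_cases hs : pvSurvB l i j = true
    · exact ⟨j, hkj, hji, hs, hgj⟩
    · obtain ⟨e, hje, hei, hse, hge⟩ := ih i j (by omega) hji hs
      exact ⟨e, by omega, hei, hse, by omega⟩

theorem pvFilterSplit {α : Type} (p : α → Bool) :
    ∀ xs : List α, xs.Pairwise (fun a b => p a = true → p b = true) →
      xs = xs.filter (fun a => !p a) ++ xs.filter p := by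
  intro xs
  induction xs with
  | nil => simp
  | cons x xs ih =>
    intro hp
    have hrest := ih hp.of_cons
    by_cases hx : p x = true
    · have hall : ∀ a ∈ xs, p a = true := fun a ha => (List.pairwise_cons.mp hp).1 a ha hx
      have h1 : xs.filter (fun a => !p a) = [] :=
        List.filter_eq_nil_iff.mpr (fun a ha => by simp [hall a ha])
      have h2 : xs.filter p = xs := List.filter_eq_self.mpr hall
      simp [List.filter_cons, hx, h1, h2]
    · simp only [List.filter_cons, hx]
      simp only [Bool.not_false, if_true, Bool.false_eq_true, if_false, List.cons_append]
      exact congrArg (x :: ·) hrest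

theorem pvFilterOrPerm {α : Type} (a b : α → Bool) :
    ∀ xs : List α, (∀ x ∈ xs, ¬(a x = true ∧ b x = true)) →
      (xs.filter (fun x => a x || b x)).Perm (xs.filter a ++ xs.filter b) := by
  intro xs
  induction xs with
  | nil => simp
  | cons x xs ih =>
    intro hd
    have ihx := ih (fun y hy => hd y (List.mem_cons_of_mem x hy))
    by_cases hax : a x = true
    · have hbx : ¬ b x = true := fun hb => hd x (List.mem_cons_self) ⟨hax, hb⟩
      simp only [List.filter_cons, hax, hbx, Bool.true_or, if_true, if_false, Bool.false_eq_true]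
      simpa using ihx.cons x
    · by_cases hbx : b x = true
      · simp only [List.filter_cons, hax, hbx, Bool.false_or, if_true, Bool.false_eq_true,
          if_false]
        exact (ihx.cons x).trans List.perm_middle.symm
      · simp only [List.filter_cons, hax, hbx, Bool.false_or, Bool.false_eq_true, if_false]
        exact ihx

theorem pvAPop_spec (pf : List Int) (i : Nat) (n : Int) :
    ∀ (B K : List (Nat × Int)) (res : Int) (ns : Nat),
      (∀ sv ∈ B, n < sv.2) → (∀ sv0, K.head? = some sv0 → ¬ n < sv0.2) →
      pvAPop pf i n (B ++ K) res ns =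
        (B.foldl (fun r sv => max r (sv.2 * (pf.getD i 0 - pf.getD sv.1 0))) res, K,
          ((B.getLast?).map Prod.fst).getD ns) := by
  intro B
  induction B with
  | nil =>
    intro K res ns _ hK
    match K, hK with
    | [], _ => simp [pvAPop]
    | (s0, v0) :: K', hK =>
      simp only [List.nil_append, List.foldl_nil, List.getLast?_nil, Option.map_none,
        Option.getD_none]
      rw [pvAPop]
      simp [hK (s0, v0) rfl]
  | cons sv B ih =>
    intro K res ns hB hK
    obtain ⟨s0, v0⟩ := sv
    have hv : n < v0 := hB (s0, v0) List.mem_cons_self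
    simp only [List.cons_append]
    rw [pvAPop]
    simp only [hv, if_true]
    rw [ih K _ s0 (fun sv hsv => hB sv (List.mem_cons_of_mem _ hsv)) hK]
    simp only [List.foldl_cons]
    congr 1
    cases B with
    | nil => simp
    | cons sv' B' =>
      obtain ⟨y, hy⟩ := Option.isSome_iff_exists.mp
        (List.getLast?_isSome.mpr (by simp) : (sv' :: B').getLast?.isSome)
      simp [hy]

theorem pvMem_survList (l : List Int) (i e : Nat) :
    e ∈ pvSurvList l i ↔ e < i ∧ pvSurvB l i e = true := by
  simp [pvSurvList]

theorem pvSurvList_pairwise (l : List Int) (i : Nat) :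
    (pvSurvList l i).Pairwise (· < ·) :=
  List.Pairwise.filter _ (List.pairwise_lt_range)

theorem pvSurv_trans (l : List Int) (i a b : Nat) (hab : a < b) (hbi : b < i)
    (ha : pvSurvB l i a = true) : pvG l a ≤ pvG l b :=
  (pvSurvB_iff l i a).mp ha b hbi hab

theorem pvSurvB_succ_iff (l : List Int) (i e : Nat) (he : e < i) :
    pvSurvB l (i + 1) e = true ↔ pvSurvB l i e = true ∧ pvG l e ≤ pvG l i := by
  rw [pvSurvB_iff, pvSurvB_iff]
  constructor
  · intro h
    exact ⟨fun j hj hje => h j (by omega) hje, h i (by omega) he⟩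
  · intro ⟨h1, h2⟩ j hj hje
    rcases Nat.lt_or_ge j i with hji | hji
    · exact h1 j hji hje
    · have : j = i := by omega
      rw [this]; exact h2

theorem pvSurvB_self (l : List Int) (i : Nat) : pvSurvB l (i + 1) i = true := by
  rw [pvSurvB_iff]; intro j hj hje; omega

theorem pvSurvList_succ (l : List Int) (i : Nat) :
    pvSurvList l (i + 1) = (List.range i).filter (fun e => pvSurvB l (i + 1) e) ++ [i] := by
  rw [pvSurvList, List.range_succ, List.filter_append]
  simp [pvSurvB_self]

theorem pvDropList_succ (l : List Int) (i : Nat) :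
    pvDropList l (i + 1) = (List.range i).filter (fun e => !pvSurvB l (i + 1) e) := by
  rw [pvDropList, List.range_succ, List.filter_append]
  simp [pvSurvB_self]

-- the geometric heart: with pops, the new start recorded by A is the canonical left
-- boundary of the element being processed
theorem pvSEi (l : List Int) (i estar : Nat)
    (he : estar < i)
    (hsurv : pvSurvB l i estar = true)
    (hgt : pvG l i < pvG l estar)
    (hbelow : ∀ x, x < estar → x < i → pvSurvB l i x = true → pvG l x ≤ pvG l i)
    (habove : ∀ x, estar < x → x < i → pvSurvB l i x = true → pvG l i < pvG l x) :
    pvLeftSpec l i (pvSE l estar) := by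
  obtain ⟨hse, hmid, hlast⟩ := pvSE_spec l estar
  refine ⟨by omega, ?_, ?_⟩
  · intro j hj hji
    rcases Nat.lt_trichotomy j estar with h | h | h
    · exact lt_trans hgt (hmid j hj h)
    · rw [h]; exact hgt
    · by_cases hs : pvSurvB l i j = true
      · exact habove j h hji hs
      · obtain ⟨e', hje', hei', hse', hge'⟩ :=
          pvExistsSurv l (i - j) i j le_rfl hji hs
        exact lt_trans (habove e' (by omega) hei' hse') hge'
  · by_cases h0 : pvSE l estar = 0
    · exact Or.inl h0
    · refine Or.inr ?_
      rcases hlast with h | hval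
      · exact absurd h h0
      by_contra hgt'
      push_neg at hgt'
      have hsurv' : pvSurvB l i (pvSE l estar - 1) = true := by
        rw [pvSurvB_iff]
        intro j hj hje
        rcases Nat.lt_trichotomy j estar with h | h | h
        · exact le_of_lt (lt_of_le_of_lt hval (hmid j (by omega) h))
        · rw [h]; exact hval
        · exact le_trans hval (pvSurv_trans l i estar j h hj hsurv)
      have := hbelow (pvSE l estar - 1) (by omega) (by omega) hsurv'
      omega

theorem pvSurvB_pointwise (l : List Int) (i : Nat) :
    ∀ e ∈ List.range i,
      pvSurvB l (i + 1) e = (pvSurvB l i e && !decide (pvG l i < pvG l e)) := by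
  intro e he
  rw [List.mem_range] at he
  have hiff := pvSurvB_succ_iff l i e he
  by_cases h2 : pvG l i < pvG l e
  · have hc : ¬ pvSurvB l (i + 1) e = true := by
      intro hc
      have := (hiff.mp hc).2
      omega
    simp [h2, Bool.eq_false_iff.mpr hc]
  · by_cases h1 : pvSurvB l i e = true
    · have hc : pvSurvB l (i + 1) e = true := hiff.mpr ⟨h1, by omega⟩
      simp [hc, h1, h2]
    · have hc : ¬ pvSurvB l (i + 1) e = true := fun hc => h1 (hiff.mp hc).1
      simp [Bool.eq_false_iff.mpr hc, Bool.eq_false_iff.mpr h1]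

theorem pvKeep_eq (l : List Int) (i : Nat) :
    (List.range i).filter (fun e => pvSurvB l (i + 1) e) =
      (pvSurvList l i).filter (fun e => !decide (pvG l i < pvG l e)) := by
  rw [pvSurvList, List.filter_filter]
  apply List.filter_congr
  intro e he
  rw [pvSurvB_pointwise l i e he, Bool.and_comm]

theorem pvAStep (l : List Int) (pf : List Int)
    (hpf : ∀ k, k ≤ l.length → pf.getD k 0 = pvPfx l k)
    (i : Nat) (hi : i < l.length) :
    ∃ st,
      pvAPop pf i (pvG l i)
          (((pvSurvList l i).map (fun e => (pvSE l e, pvG l e))).reverse)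
          (pvM ((pvDropList l i).map (pvProd l))) i
        = (pvM ((pvDropList l (i + 1)).map (pvProd l)), st, pvSE l i) ∧
      ((pvSurvList l (i + 1)).map (fun e => (pvSE l e, pvG l e))).reverse
        = (pvSE l i, pvG l i) :: st := by
  have hpair : (pvSurvList l i).Pairwise
      (fun a b => decide (pvG l i < pvG l a) = true → decide (pvG l i < pvG l b) = true) := by
    refine (pvSurvList_pairwise l i).imp_of_mem ?_
    intro a b ha hb hab
    have ha' := (pvMem_survList l i a).mp ha
    have hb' := (pvMem_survList l i b).mp hb
    have hle := pvSurv_trans l i a b hab hb'.1 ha'.2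
    simp only [decide_eq_true_eq]
    omega
  have hsplit := pvFilterSplit (fun e => decide (pvG l i < pvG l e)) (pvSurvList l i) hpair
  have hkeepmem : ∀ e ∈ (pvSurvList l i).filter (fun e => !decide (pvG l i < pvG l e)),
      e < i ∧ pvSurvB l i e = true ∧ ¬ pvG l i < pvG l e := by
    intro e he
    rw [List.mem_filter] at he
    have h1 := (pvMem_survList l i e).mp he.1
    have h2 := he.2
    simp only [Bool.not_eq_true', decide_eq_false_iff_not] at h2
    exact ⟨h1.1, h1.2, h2⟩
  have hpopmem : ∀ e ∈ (pvSurvList l i).filter (fun e => decide (pvG l i < pvG l e)),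
      e < i ∧ pvSurvB l i e = true ∧ pvG l i < pvG l e := by
    intro e he
    rw [List.mem_filter] at he
    have h1 := (pvMem_survList l i e).mp he.1
    have h2 := he.2
    simp only [decide_eq_true_eq] at h2
    exact ⟨h1.1, h1.2, h2⟩
  have horder : ∀ a ∈ (pvSurvList l i).filter (fun e => !decide (pvG l i < pvG l e)),
      ∀ b ∈ (pvSurvList l i).filter (fun e => decide (pvG l i < pvG l e)), a < b := by
    have hp := pvSurvList_pairwise l i
    rw [hsplit] at hp
    exact fun a ha b hb => (List.pairwise_append.mp hp).2.2 a ha b hb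
  -- the recorded new start equals the canonical left boundary of i
  have hnseq :
      (((((pvSurvList l i).filter (fun e => decide (pvG l i < pvG l e))).map
          (fun e => (pvSE l e, pvG l e))).reverse.getLast?).map Prod.fst).getD i
        = pvSE l i := by
    rw [List.getLast?_reverse, List.head?_map]
    cases hpopc : (pvSurvList l i).filter (fun e => decide (pvG l i < pvG l e)) with
    | nil =>
      simp only [List.head?_nil, Option.map_none, Option.getD_none]
      rcases Nat.eq_zero_or_pos i with hic | hic
      · subst hic; rfl
      · have hii : i - 1 + 1 = i := by omega
        have hmem : i - 1 ∈ pvSurvList l i := by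
          rw [pvMem_survList]
          refine ⟨by omega, ?_⟩
          rw [← hii]
          exact pvSurvB_self l (i - 1)
        have hkeep : i - 1 ∈ (pvSurvList l i).filter
            (fun e => !decide (pvG l i < pvG l e)) := by
          rw [hsplit] at hmem
          rcases List.mem_append.mp hmem with h | h
          · exact h
          · rw [hpopc] at h; simp at h
        have hle : pvG l (i - 1) ≤ pvG l i := by
          have := (hkeepmem (i - 1) hkeep).2.2
          omega
        symm
        apply pvLeftSpec_unique l i _ _ (pvSE_spec l i)
        exact ⟨le_rfl, fun j h1 h2 => by omega, Or.inr hle⟩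
    | cons estar pop' =>
      simp only [List.head?_cons, Option.map_some, Option.getD_some]
      have hmem := hpopmem estar (by rw [hpopc]; exact List.mem_cons_self)
      symm
      apply pvLeftSpec_unique l i _ _ (pvSE_spec l i)
      apply pvSEi l i estar hmem.1 hmem.2.1 hmem.2.2
      · -- survivors left of estar are small
        intro y hy hyi hys
        have hyS : y ∈ pvSurvList l i := (pvMem_survList l i y).mpr ⟨hyi, hys⟩
        rw [hsplit] at hyS
        rcases List.mem_append.mp hyS with h | h
        · have := (hkeepmem y h).2.2
          omega
        · rw [hpopc] at h
          have hp := pvSurvList_pairwise l i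
          rw [hsplit, hpopc] at hp
          have hpp := (List.pairwise_append.mp hp).2.1
          rcases List.mem_cons.mp h with h' | h'
          · omega
          · have := (List.pairwise_cons.mp hpp).1 y h'
            omega
      · -- survivors right of estar are large
        intro y hy hyi hys
        have hyS : y ∈ pvSurvList l i := (pvMem_survList l i y).mpr ⟨hyi, hys⟩
        rw [hsplit] at hyS
        rcases List.mem_append.mp hyS with h | h
        · have := horder y h estar (by rw [hpopc]; exact List.mem_cons_self)
          omega
        · exact (hpopmem y h).2.2
  -- the products recorded while popping are the canonical window products
  have hprod : ∀ e ∈ (pvSurvList l i).filter (fun e => decide (pvG l i < pvG l e)),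
      pvG l e * (pf.getD i 0 - pf.getD (pvSE l e) 0) = pvProd l e := by
    intro e he
    have hmem := hpopmem e he
    have hre : pvRE l e = i := by
      apply pvRightSpec_unique l e _ _ (pvRE_spec l e (by omega))
      exact ⟨hmem.1, by omega, fun j h1 h2 => pvSurv_trans l i e j h1 (by omega) hmem.2.1,
        Or.inr hmem.2.2⟩
    have hse := (pvSE_spec l e).1
    rw [pvProd, hre, hpf i (by omega), hpf (pvSE l e) (by omega)]
  -- run the pop loop
  refine ⟨(((pvSurvList l i).filter (fun e => !decide (pvG l i < pvG l e))).map
      (fun e => (pvSE l e, pvG l e))).reverse, ?_, ?_⟩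
  · conv_lhs => rw [hsplit]
    rw [List.map_append, List.reverse_append]
    rw [pvAPop_spec pf i (pvG l i) _ _ _ i ?hB ?hK]
    case hB =>
      intro sv hsv
      rw [List.mem_reverse, List.mem_map] at hsv
      obtain ⟨e, he, rfl⟩ := hsv
      exact (hpopmem e he).2.2
    case hK =>
      intro sv0 h
      have hm : sv0 ∈ (((pvSurvList l i).filter
          (fun e => !decide (pvG l i < pvG l e))).map (fun e => (pvSE l e, pvG l e))).reverse :=
        List.mem_of_mem_head? h
      rw [List.mem_reverse, List.mem_map] at hm
      obtain ⟨e, he, rfl⟩ := hm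
      exact (hkeepmem e he).2.2
    refine Prod.ext ?_ (Prod.ext rfl hnseq)
    -- the accumulated maximum
    simp only
    rw [← List.map_reverse, List.foldl_map]
    have hcong := PySem.List.foldl_congr_mem
      (l := ((pvSurvList l i).filter (fun e => decide (pvG l i < pvG l e))).reverse)
      (f := fun x y => max x ((pvSE l y, pvG l y).2 *
        (pf.getD i 0 - pf.getD (pvSE l y, pvG l y).1 0)))
      (g := fun r e => max r (pvProd l e))
      (init := pvM ((pvDropList l i).map (pvProd l)))
      (by
        intro acc e he
        rw [List.mem_reverse] at he
        simp only
        rw [hprod e he])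
    rw [hcong, ← List.foldl_map (f := pvProd l) (g := fun r v => max r v)]
    simp only [pvM]
    rw [← List.foldl_append]
    have hperm : ((pvDropList l (i + 1)).map (pvProd l)).Perm
        ((pvDropList l i).map (pvProd l) ++
          (((pvSurvList l i).filter (fun e => decide (pvG l i < pvG l e))).reverse).map
            (pvProd l)) := by
      have h1 : pvDropList l (i + 1) =
          (List.range i).filter
            (fun e => !pvSurvB l i e || (pvSurvB l i e && decide (pvG l i < pvG l e))) := by
        rw [pvDropList_succ]
        apply List.filter_congr
        intro e he
        rw [pvSurvB_pointwise l i e he]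
        cases pvSurvB l i e <;> cases hd : decide (pvG l i < pvG l e) <;> simp [hd]
      have h2 := pvFilterOrPerm (fun e => !pvSurvB l i e)
        (fun e => pvSurvB l i e && decide (pvG l i < pvG l e)) (List.range i)
        (by intro x _ hx; rcases hx with ⟨hx1, hx2⟩; simp at hx1 hx2; rw [hx2.1] at hx1; simp at hx1)
      have h3 : (List.range i).filter (fun e => pvSurvB l i e && decide (pvG l i < pvG l e))
          = (pvSurvList l i).filter (fun e => decide (pvG l i < pvG l e)) := by
        rw [pvSurvList, List.filter_filter]
        apply List.filter_congr
        intro e _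
        rw [Bool.and_comm]
      rw [h1]
      refine (h2.map (pvProd l)).trans ?_
      rw [List.map_append, h3]
      apply List.Perm.append_left
      exact (((pvSurvList l i).filter
        (fun e => decide (pvG l i < pvG l e))).reverse_perm.map (pvProd l)).symm
    exact (hperm.foldl_eq 0).symm
  · rw [pvSurvList_succ, pvKeep_eq, List.map_append, List.reverse_append]
    simp
theorem pvAMain_spec (l : List Int) (pf : List Int)
    (hpf : ∀ k, k ≤ l.length → pf.getD k 0 = pvPfx l k) :
    ∀ rest i res stack,
      rest = l.drop i → i ≤ l.length →
      stack = ((pvSurvList l i).map (fun e => (pvSE l e, pvG l e))).reverse →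
      res = pvM ((pvDropList l i).map (pvProd l)) →
      pvAMain pf rest i res stack =
        (pvM ((pvDropList l l.length).map (pvProd l)),
          ((pvSurvList l l.length).map (fun e => (pvSE l e, pvG l e))).reverse) := by
  intro rest
  induction rest with
  | nil =>
    intro i res stack hrest hin hstack hres
    have hlen : l.length ≤ i := by
      by_contra h
      push_neg at h
      have hne : l.drop i ≠ [] := by
        intro hc
        rw [List.drop_eq_nil_iff] at hc
        omega
      exact hne hrest.symm
    have hi : i = l.length := by omega
    subst hi
    rw [pvAMain, hstack, hres]
  | cons x rest' ih =>
    intro i res stack hrest hin hstack hres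
    have hdrop : l.drop i = x :: rest' := hrest.symm
    have hilt : i < l.length := by
      by_contra h
      push_neg at h
      rw [List.drop_eq_nil_iff.mpr h] at hdrop
      exact absurd hdrop (by simp)
    have hx : x = pvG l i := by
      have h1 : (l.drop i).head? = some x := by rw [hdrop]; rfl
      rw [List.head?_drop] at h1
      simp only [pvG, List.getD, h1, Option.getD_some]
    have hrest' : rest' = l.drop (i + 1) := by
      have h2 : (l.drop i).drop 1 = l.drop (i + 1) := by
        rw [List.drop_drop]
      rw [hdrop] at h2
      simpa using h2
    obtain ⟨st, hstep, hstack2⟩ := pvAStep l pf hpf i hilt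
    rw [pvAMain, hstack, hres, hx, hstep]
    exact ih (i + 1) _ _ hrest' (by omega) hstack2.symm rfl

theorem pvA_key (l : List Int) :
    maxSumMinProduct l = PySem.Int.mod (pvKey l) (10 ^ 9 + 7) := by
  have hpf : ∀ k, k ≤ l.length → (pvPrefix l).getD k 0 = pvPfx l k :=
    fun k hk => pvPrefix_getD l k hk
  have hmain := pvAMain_spec l (pvPrefix l) hpf l 0 0 [] (by simp) (by simp)
    (by simp [pvSurvList]) (by simp [pvDropList, pvM])
  rw [maxSumMinProduct]
  simp only
  rw [hmain]
  simp only [List.reverse_reverse]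
  congr 1
  rw [List.foldl_map]
  have hcong := PySem.List.foldl_congr_mem
    (l := pvSurvList l l.length)
    (f := fun r e => max r ((pvSE l e, pvG l e).2 *
      ((pvPrefix l).getD l.length 0 - (pvPrefix l).getD (pvSE l e, pvG l e).1 0)))
    (g := fun r e => max r (pvProd l e))
    (init := pvM ((pvDropList l l.length).map (pvProd l)))
    (by
      intro acc e he
      have hmem := (pvMem_survList l l.length e).mp he
      have hre : pvRE l e = l.length := by
        apply pvRightSpec_unique l e _ _ (pvRE_spec l e hmem.1)
        exact ⟨hmem.1, le_rfl,
          fun j h1 h2 => pvSurv_trans l l.length e j h1 h2 hmem.2, Or.inl rfl⟩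
      have hse := (pvSE_spec l e).1
      simp only
      rw [hpf l.length le_rfl, hpf (pvSE l e) (by omega), ← hre, ← pvProd]
    )
  rw [hcong, ← List.foldl_map (f := pvProd l) (g := fun r v => max r v)]
  simp only [pvM, pvKey]
  rw [← List.foldl_append]
  have hperm : ((pvDropList l l.length ++ pvSurvList l l.length).map (pvProd l)).Perm
      ((List.range l.length).map (pvProd l)) := by
    refine List.Perm.map _ ?_
    have h := List.filter_append_perm (fun e => !pvSurvB l l.length e) (List.range l.length)
    have h2 : (List.range l.length).filter (fun x => !(!pvSurvB l l.length x))
        = pvSurvList l l.length := by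
      rw [pvSurvList]
      apply List.filter_congr
      intro e _
      simp
    rw [h2] at h
    exact h
  rw [← List.map_append]
  exact hperm.foldl_eq 0

theorem pvBJumpL_spec (l : List Int) (acc : List Nat) (i : Nat)
    (hacc : ∀ k, k < i → acc.getD k 0 = pvSE l k) :
    ∀ fuel s, s ≤ fuel → s ≤ i → (∀ j, s ≤ j → j < i → pvG l i < pvG l j) →
      pvLeftSpec l i (pvBJumpL l acc (pvG l i) fuel s) := by
  intro fuel
  induction fuel with
  | zero =>
    intro s hsf hsi hmid
    have : s = 0 := by omega
    subst this
    simp only [pvBJumpL]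
    exact ⟨Nat.zero_le i, hmid, Or.inl rfl⟩
  | succ fuel ih =>
    intro s hsf hsi hmid
    rw [pvBJumpL]
    by_cases hs : 0 < s
    · simp only [hs, if_true]
      have hsg : l.getD (s - 1) 0 = pvG l (s - 1) := rfl
      by_cases hlt : pvG l i < pvG l (s - 1)
      · simp only [hsg, hlt, if_true]
        have hspec := pvSE_spec l (s - 1)
        have hget : acc.getD (s - 1) 0 = pvSE l (s - 1) := hacc (s - 1) (by omega)
        rw [hget]
        apply ih (pvSE l (s - 1)) (by have := hspec.1; omega) (by have := hspec.1; omega)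
        intro j hj hji
        rcases Nat.lt_or_ge j (s - 1) with h | h
        · exact lt_trans hlt (hspec.2.1 j hj h)
        · rcases Nat.eq_or_lt_of_le h with h' | h'
          · rw [← h']; exact hlt
          · exact hmid j (by omega) hji
      · simp only [hsg, hlt, if_false]
        exact ⟨hsi, hmid, Or.inr (not_lt.mp hlt)⟩
    · simp only [hs, if_false]
      have : s = 0 := by omega
      subst this
      exact ⟨Nat.zero_le i, hmid, Or.inl rfl⟩

theorem pvBJumpR_spec (l : List Int) (acc : List Nat) (i : Nat)
    (hacc : ∀ k, i < k → k < l.length → acc.getD k 0 = pvRE l k) (hi : i < l.length) :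
    ∀ fuel r, l.length ≤ r + fuel → i < r → r ≤ l.length →
      (∀ j, i < j → j < r → pvG l i ≤ pvG l j) →
      pvRightSpec l i (pvBJumpR l acc (pvG l i) fuel r) := by
  intro fuel
  induction fuel with
  | zero =>
    intro r hrf hir hrl hmid
    have : r = l.length := by omega
    simp only [pvBJumpR]
    exact ⟨by omega, by omega, hmid, Or.inl this⟩
  | succ fuel ih =>
    intro r hrf hir hrl hmid
    rw [pvBJumpR]
    by_cases hr : r < l.length
    · simp only [hr, if_true]
      have hrg : l.getD r 0 = pvG l r := rfl
      by_cases hle : pvG l i ≤ pvG l r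
      · simp only [hrg, hle, if_true]
        have hspec := pvRE_spec l r hr
        have hget : acc.getD r 0 = pvRE l r := hacc r hir hr
        rw [hget]
        apply ih (pvRE l r) (by have := hspec.1; omega) (by have := hspec.1; omega)
          hspec.2.1
        intro j hij hj
        rcases Nat.lt_or_ge j r with h | h
        · exact hmid j hij h
        · rcases Nat.eq_or_lt_of_le h with h' | h'
          · rw [← h']; exact hle
          · exact le_trans hle (hspec.2.2.1 j (by omega) hj)
      · simp only [hrg, hle, if_false]
        exact ⟨hir, by omega, hmid, Or.inr (not_le.mp hle)⟩
    · simp only [hr, if_false]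
      exact ⟨hir, by omega, hmid, Or.inl (by omega)⟩

theorem pvFoldlMaxExt (A B : Nat → Int) (init : Int) (xs : List Nat)
    (h : ∀ x ∈ xs, A x = B x) :
    xs.foldl (fun r e => max r (A e)) init = xs.foldl (fun r e => max r (B e)) init :=
  PySem.List.foldl_congr_mem (l := xs) (f := fun r e => max r (A e))
    (g := fun r e => max r (B e)) (init := init) (by intro acc x hx; simp only []; rw [h x hx])

theorem pvGetD_set (xs : List Nat) (i k : Nat) (v : Nat) :
    (xs.set i v).getD k 0 = if i = k ∧ i < xs.length then v else xs.getD k 0 := by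
  simp only [List.getD_eq_getElem?_getD, List.getElem?_set]
  by_cases h1 : i = k
  · subst h1
    by_cases h2 : i < xs.length
    · simp [h2]
    · simp [h2, List.getElem?_eq_none (by omega : xs.length ≤ i)]
  · simp [h1]

theorem pvLeftBuild (l : List Int) : ∀ m, m ≤ l.length →
    (((List.range m).foldl
        (fun left i => left ++ [pvBJumpL l left (l.getD i 0) i i]) []).length = m ∧
      ∀ k, k < m →
        ((List.range m).foldl
          (fun left i => left ++ [pvBJumpL l left (l.getD i 0) i i]) []).getD k 0 = pvSE l k)
  | 0, _ => by simp
  | m + 1, hm => by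
    obtain ⟨ihlen, ihget⟩ := pvLeftBuild l m (by omega)
    rw [List.range_succ, List.foldl_append, List.foldl_cons, List.foldl_nil]
    have hval : pvBJumpL l
        ((List.range m).foldl (fun left i => left ++ [pvBJumpL l left (l.getD i 0) i i]) [])
        (l.getD m 0) m m = pvSE l m := by
      apply pvLeftSpec_unique l m _ _ ?_ (pvSE_spec l m)
      exact pvBJumpL_spec l _ m ihget m m le_rfl le_rfl (fun j h1 h2 => by omega)
    refine ⟨by rw [List.length_append, ihlen]; rfl, ?_⟩
    intro k hk
    rcases Nat.lt_or_ge k m with h | h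
    · rw [List.getD_append _ _ _ _ (by omega)]
      exact ihget k h
    · have hkm : k = m := by omega
      subst hkm
      rw [List.getD_append_right _ _ _ _ (by omega), ihlen]
      simpa using hval

theorem pvRightBuild (l : List Int) : ∀ m, m ≤ l.length → ∀ acc : List Nat,
    acc.length = l.length →
    (∀ k, k < l.length → acc.getD k 0 = if m ≤ k then pvRE l k else l.length) →
    (((List.range m).reverse.foldl
        (fun right i =>
          right.set i (pvBJumpR l right (l.getD i 0) (l.length - (i + 1)) (i + 1)))
        acc).length = l.length ∧
      ∀ k, k < l.length →
        ((List.range m).reverse.foldl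
          (fun right i =>
            right.set i (pvBJumpR l right (l.getD i 0) (l.length - (i + 1)) (i + 1)))
          acc).getD k 0 = pvRE l k)
  | 0, _, acc, hlen, hget => by
    refine ⟨by simpa using hlen, ?_⟩
    intro k hk
    simpa using (hget k hk).trans (by simp)
  | m + 1, hm, acc, hlen, hget => by
    have hrev : (List.range (m + 1)).reverse = m :: (List.range m).reverse := by
      rw [List.range_succ, List.reverse_append]
      rfl
    rw [hrev, List.foldl_cons]
    have hval : pvBJumpR l acc (l.getD m 0) (l.length - (m + 1)) (m + 1) = pvRE l m := by
      apply pvRightSpec_unique l m _ _ ?_ (pvRE_spec l m (by omega))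
      exact pvBJumpR_spec l acc m
        (fun k hk1 hk2 => by rw [hget k hk2, if_pos (by omega)])
        (by omega) (l.length - (m + 1)) (m + 1) (by omega) (by omega) (by omega)
        (fun j h1 h2 => by omega)
    apply pvRightBuild l m (by omega) _ (by simpa using hlen)
    intro k hk
    rw [hval, pvGetD_set]
    by_cases h1 : m = k
    · subst h1
      rw [if_pos ⟨rfl, by omega⟩, if_pos (by omega)]
    · rw [if_neg (by simp [h1]), hget k hk]
      by_cases h2 : m + 1 ≤ k
      · rw [if_pos h2, if_pos (by omega)]
      · rw [if_neg h2, if_neg (by omega)]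

theorem pvB_key (l : List Int) :
    maxSumMinProduct_alt l = PySem.Int.mod (pvKey l) (10 ^ 9 + 7) := by
  obtain ⟨hllen, hlget⟩ := pvLeftBuild l l.length le_rfl
  obtain ⟨hrlen, hrget⟩ := pvRightBuild l l.length le_rfl
    (List.replicate l.length l.length) (by simp)
    (by
      intro k hk
      rw [if_neg (by omega)]
      simp [List.getD_eq_getElem?_getD, List.getElem?_replicate, hk])
  rw [maxSumMinProduct_alt]
  congr 1
  rw [pvFoldlMaxExt _ (pvProd l) 0 _ ?_]
  · rw [pvKey, pvM, ← List.foldl_map]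
  · intro i hi
    rw [List.mem_range] at hi
    rw [hrget i hi, hlget i hi,
      pvPrefix_getD l (pvRE l i) (pvRE_spec l i hi).2.1,
      pvPrefix_getD l (pvSE l i) (by have := (pvSE_spec l i).1; omega)]
    rfl

-- ===== VERDICT (by name: the statement is the Claim_ definition above) =====
theorem maxSumMinProduct_spec : Claim_equal_maxSumMinProduct := by
  intro nums _
  unfold Spec_maxSumMinProduct
  rw [pvA_key, pvB_key]
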